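-- pv_equiv track=rewrite | github.com/hecmay/allo | allo/tiles.py | generate_loops
-- ===== SOURCE A (Python) =====
-- def generate_loops(op, args):
--     # affine.for %arg3 = 0 to 64 {
--     #   affine.for %arg4 = 0 to 64 {
--     #     affine.for %arg5 = 0 to 64 {
--     #       %0 = affine.load %arg1[%arg3, %arg5] : memref<64x64xf32>
--     #       %1 = affine.load %arg2[%arg5, %arg4] : memref<64x64xf32>
--     #       %2 = arith.mulf %0, %1 : f32
--     #       %3 = affine.load %arg0[%arg3, %arg4] : memref<64x64xf32>
--     #       %4 = arith.addf %3, %2 : f32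
--     #       affine.store %4, %arg0[%arg3, %arg4] : memref<64x64xf32>
--     #     }
--     #   }
--     # }
--     # build netsed loop from inner to outer
--     code = []
--     if op == "MatMult" or op == "BatchMatMult":
--         indent = (len(args) + 1) * 2 * " "
--         code.append(indent + f"%0 = affine.load %arg1[%arg3, %arg5] : memref<{args[0]}x{args[2]}xf32>")
--         code.append(indent + f"%1 = affine.load %arg2[%arg5, %arg4] : memref<{args[2]}x{args[1]}xf32>")
--         code.append(indent + f"%2 = arith.mulf %0, %1 : f32")
--         code.append(indent + f"%3 = affine.load %arg0[%arg3, %arg4] : memref<{args[0]}x{args[1]}xf32>")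
--         code.append(indent + f"%4 = arith.addf %3, %2 : f32")
--         code.append(indent + f"affine.store %4, %arg0[%arg3, %arg4] : memref<{args[0]}x{args[1]}xf32>")
--
--         # from innner (last) to outer (first)
--         for i in range(len(args) - 1, -1, -1):
--             indent = (i + 2) * 2 * " "
--             code = [ indent + f"affine.for %arg{i + 3} = 0 to {args[i]} {{" ] + code
--             code.append(indent + "}")
--
--     else:
--         raise ValueError(f"Unsupported operation: {op}")
--
--     return "\n".join(code)
-- ===== SOURCE B (Python) =====
-- def generate_loops(op, args):
--     if op != "MatMult" and op != "BatchMatMult":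
--         raise ValueError(f"Unsupported operation: {op}")
--     n = len(args)
--     body_indent = " " * ((n + 1) * 2)
--     body = [body_indent + line for line in (
--         f"%0 = affine.load %arg1[%arg3, %arg5] : memref<{args[0]}x{args[2]}xf32>",
--         f"%1 = affine.load %arg2[%arg5, %arg4] : memref<{args[2]}x{args[1]}xf32>",
--         "%2 = arith.mulf %0, %1 : f32",
--         f"%3 = affine.load %arg0[%arg3, %arg4] : memref<{args[0]}x{args[1]}xf32>",
--         "%4 = arith.addf %3, %2 : f32",
--         f"affine.store %4, %arg0[%arg3, %arg4] : memref<{args[0]}x{args[1]}xf32>",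
--     )]
--
--     def wrap(i):
--         # recursion over the nesting depth: loop i wraps everything inside it
--         if i == n:
--             return body
--         ind = " " * ((i + 2) * 2)
--         return [ind + f"affine.for %arg{i + 3} = 0 to {args[i]} {{"] + wrap(i + 1) + [ind + "}"]
--
--     return "\n".join(wrap(0))
-- ===== Notes on version B (the rewrite author's own statement) =====
-- stated objective: alternative
-- what changed: B validates op up front and builds the nested loop text by recursion over the nesting depth (a wrap(i) helper emitting header, recursive inner text, closing brace), instead of A's inner-to-outer loop that prepends a header and appends a brace to a flat accumulator each step; the body lines are produced by mapping an indent over raw lines.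
import Mathlib
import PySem

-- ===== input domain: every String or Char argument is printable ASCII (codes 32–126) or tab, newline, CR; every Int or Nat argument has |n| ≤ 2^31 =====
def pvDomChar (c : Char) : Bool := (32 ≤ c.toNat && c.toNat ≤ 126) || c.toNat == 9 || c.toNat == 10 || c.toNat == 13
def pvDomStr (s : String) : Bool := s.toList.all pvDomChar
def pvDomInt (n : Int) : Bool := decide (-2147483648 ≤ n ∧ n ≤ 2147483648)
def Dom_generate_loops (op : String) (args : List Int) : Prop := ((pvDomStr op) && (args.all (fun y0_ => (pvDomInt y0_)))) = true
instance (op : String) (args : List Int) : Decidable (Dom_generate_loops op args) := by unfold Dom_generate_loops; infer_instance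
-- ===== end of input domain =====

-- B builds the nested text by recursion over the nesting depth instead of A's
-- inner-to-outer prepend/append accumulation; same output string (objective: alternative).

-- " " * k  (Python string repetition; exact for k ≥ 0, "" for k < 0 via toNat at call sites)
def glSpaces (k : Nat) : String := String.ofList (List.replicate k ' ')

-- ===== PORT A =====
def generate_loops (op : String) (args : List Int) : String :=
  if op == "MatMult" || op == "BatchMatMult" then
    -- indent = (len(args)+1)*2*" "
    let indent := glSpaces ((args.length + 1) * 2)
    -- args[0], args[1], args[2] via pyGetD (Pre_ guarantees length ≥ 3, so in range)
    let code : List String :=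
      [ indent ++ "%0 = affine.load %arg1[%arg3, %arg5] : memref<" ++ PySem.Int.toStr (PySem.List.pyGetD args 0 0) ++ "x" ++ PySem.Int.toStr (PySem.List.pyGetD args 2 0) ++ "xf32>"
      , indent ++ "%1 = affine.load %arg2[%arg5, %arg4] : memref<" ++ PySem.Int.toStr (PySem.List.pyGetD args 2 0) ++ "x" ++ PySem.Int.toStr (PySem.List.pyGetD args 1 0) ++ "xf32>"
      , indent ++ "%2 = arith.mulf %0, %1 : f32"
      , indent ++ "%3 = affine.load %arg0[%arg3, %arg4] : memref<" ++ PySem.Int.toStr (PySem.List.pyGetD args 0 0) ++ "x" ++ PySem.Int.toStr (PySem.List.pyGetD args 1 0) ++ "xf32>"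
      , indent ++ "%4 = arith.addf %3, %2 : f32"
      , indent ++ "affine.store %4, %arg0[%arg3, %arg4] : memref<" ++ PySem.Int.toStr (PySem.List.pyGetD args 0 0) ++ "x" ++ PySem.Int.toStr (PySem.List.pyGetD args 1 0) ++ "xf32>" ]
    -- for i in range(len(args)-1, -1, -1): code = [header] + code; code.append("}")
    let code := (PySem.List.pyRange ((args.length : Int) - 1) (-1) (-1)).foldl
      (fun code i =>
        (glSpaces (((i + 2) * 2).toNat) ++ "affine.for %arg" ++ PySem.Int.toStr (i + 3) ++ " = 0 to " ++ PySem.Int.toStr (PySem.List.pyGetD args i 0) ++ " {")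
          :: code ++ [glSpaces (((i + 2) * 2).toNat) ++ "}"])
      code
    String.intercalate "\n" code
  else
    ""  -- Python raises ValueError here; excluded by Pre_

-- ===== PORT B =====
-- wrap(i): the nested text from loop level i inward; body at level n
def glWrap (args : List Int) (body : List String) (i : Nat) : List String :=
  if i < args.length then
    (glSpaces ((((i : Int) + 2) * 2).toNat) ++ "affine.for %arg" ++ PySem.Int.toStr ((i : Int) + 3) ++ " = 0 to " ++ PySem.Int.toStr (PySem.List.pyGetD args (i : Int) 0) ++ " {")
      :: glWrap args body (i + 1) ++ [glSpaces ((((i : Int) + 2) * 2).toNat) ++ "}"]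
  else
    body
termination_by args.length - i

def generate_loops_alt (op : String) (args : List Int) : String :=
  if op != "MatMult" && op != "BatchMatMult" then
    ""  -- Python raises ValueError here; excluded by Pre_
  else
    let bodyIndent := glSpaces ((args.length + 1) * 2)
    let body :=
      [ "%0 = affine.load %arg1[%arg3, %arg5] : memref<" ++ PySem.Int.toStr (PySem.List.pyGetD args 0 0) ++ "x" ++ PySem.Int.toStr (PySem.List.pyGetD args 2 0) ++ "xf32>"
      , "%1 = affine.load %arg2[%arg5, %arg4] : memref<" ++ PySem.Int.toStr (PySem.List.pyGetD args 2 0) ++ "x" ++ PySem.Int.toStr (PySem.List.pyGetD args 1 0) ++ "xf32>"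
      , "%2 = arith.mulf %0, %1 : f32"
      , "%3 = affine.load %arg0[%arg3, %arg4] : memref<" ++ PySem.Int.toStr (PySem.List.pyGetD args 0 0) ++ "x" ++ PySem.Int.toStr (PySem.List.pyGetD args 1 0) ++ "xf32>"
      , "%4 = arith.addf %3, %2 : f32"
      , "affine.store %4, %arg0[%arg3, %arg4] : memref<" ++ PySem.Int.toStr (PySem.List.pyGetD args 0 0) ++ "x" ++ PySem.Int.toStr (PySem.List.pyGetD args 1 0) ++ "xf32>"
      ].map (fun line => bodyIndent ++ line)
    String.intercalate "\n" (glWrap args body 0)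

-- ===== PRECONDITION & SPEC =====
-- Pre_ excludes exactly the inputs on which the Python A raises: ValueError for any
-- op other than "MatMult"/"BatchMatMult", and IndexError (args[2]) when len(args) < 3.
def Pre_generate_loops (op : String) (args : List Int) : Prop :=
  (op = "MatMult" ∨ op = "BatchMatMult") ∧ 3 ≤ args.length
instance (op : String) (args : List Int) : Decidable (Pre_generate_loops op args) := by
  unfold Pre_generate_loops; infer_instance

def pvWitness_generate_loops : String × List Int := ("MatMult", [4, 5, 6])

def Spec_generate_loops (op : String) (args : List Int) (out : String) : Prop := out = generate_loops_alt op args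
instance (op : String) (args : List Int) (out : String) : Decidable (Spec_generate_loops op args out) := by unfold Spec_generate_loops; infer_instance

-- ===== CLAIM (what is proved, stated in full; the proofs are below) =====
def Claim_equal_generate_loops : Prop := ∀ (op : String) (args : List Int), Dom_generate_loops op args → Pre_generate_loops op args → Spec_generate_loops op args (generate_loops op args)

-- ===== LEMMAS AND PROOFS =====

-- the header/closer of loop level i (shared shape of both ports, used only in the proofs)
def glHdr (args : List Int) (i : Int) : String :=
  glSpaces (((i + 2) * 2).toNat) ++ "affine.for %arg" ++ PySem.Int.toStr (i + 3) ++ " = 0 to " ++ PySem.Int.toStr (PySem.List.pyGetD args i 0) ++ " {"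
def glCl (i : Int) : String := glSpaces (((i + 2) * 2).toNat) ++ "}"

-- nesting of levels i..j-1 around a core c (generalises glWrap's fixed bound args.length)
def glSeg (args : List Int) (j : Nat) (c : List String) (i : Nat) : List String :=
  if i < j then glHdr args i :: glSeg args j c (i + 1) ++ [glCl i] else c
termination_by j - i

theorem glSeg_push (args : List Int) (j : Nat) (c : List String) :
    ∀ i, i ≤ j → glSeg args j (glHdr args j :: c ++ [glCl j]) i = glSeg args (j + 1) c i := by
  intro i hij
  induction hj : j - i generalizing i with
  | zero =>
    have hij' : i = j := by omega
    subst hij'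
    rw [glSeg, if_neg (lt_irrefl i)]
    conv_rhs => rw [glSeg]
    rw [if_pos (Nat.lt_succ_self i)]
    conv_rhs => rw [glSeg]
    rw [if_neg (lt_irrefl (i + 1))]
  | succ k ih =>
    have h1 : i < j := by omega
    conv_lhs => rw [glSeg]
    conv_rhs => rw [glSeg]
    rw [if_pos h1, if_pos (by omega : i < j + 1), ih (i + 1) (by omega) (by omega)]

theorem glFoldl_eq_glSeg (args : List Int) (j : Nat) (c : List String) :
    (PySem.List.pyRange ((j : Int) - 1) (-1) (-1)).foldl
      (fun code i =>
        (glSpaces (((i + 2) * 2).toNat) ++ "affine.for %arg" ++ PySem.Int.toStr (i + 3) ++ " = 0 to " ++ PySem.Int.toStr (PySem.List.pyGetD args i 0) ++ " {")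
          :: code ++ [glSpaces (((i + 2) * 2).toNat) ++ "}"])
      c = glSeg args j c 0 := by
  induction j generalizing c with
  | zero =>
    rw [PySem.List.pyRange_neg_one_eq_nil (by norm_num)]
    rw [glSeg]; simp
  | succ k ih =>
    have hcons : PySem.List.pyRange (((k : Int) + 1) - 1) (-1) (-1)
        = ((k : Int)) :: PySem.List.pyRange ((k : Int) - 1) (-1) (-1) := by
      have := PySem.List.pyRange_neg_one_cons (a := ((k : Int) + 1) - 1) (b := -1)
        (by omega)
      simpa using this
    push_cast
    rw [hcons, List.foldl_cons, ih]
    have : (glSpaces ((((k : Int) + 2) * 2).toNat) ++ "affine.for %arg" ++ PySem.Int.toStr ((k : Int) + 3) ++ " = 0 to " ++ PySem.Int.toStr (PySem.List.pyGetD args (k : Int) 0) ++ " {")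
          :: c ++ [glSpaces ((((k : Int) + 2) * 2).toNat) ++ "}"]
        = glHdr args k :: c ++ [glCl k] := rfl
    rw [this, glSeg_push args k c 0 (by omega)]

theorem glWrap_eq_glSeg (args : List Int) (body : List String) :
    ∀ i, glWrap args body i = glSeg args args.length body i := by
  intro i
  induction hj : args.length - i generalizing i with
  | zero =>
    have h0 : ¬ i < args.length := by omega
    conv_lhs => rw [glWrap]
    conv_rhs => rw [glSeg]
    rw [if_neg h0, if_neg h0]
  | succ k ih =>
    have h1 : i < args.length := by omega
    conv_lhs => rw [glWrap]
    conv_rhs => rw [glSeg]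
    rw [if_pos h1, if_pos h1, ih (i + 1) (by omega)]
    rfl

-- ===== VERDICT (by name: the statement is the Claim_ definition above) =====
theorem generate_loops_spec : Claim_equal_generate_loops := by
  intro op args _ hpre
  unfold Spec_generate_loops generate_loops generate_loops_alt
  obtain ⟨hop, _⟩ := hpre
  have hgA : (op == "MatMult" || op == "BatchMatMult") = true := by
    rcases hop with h | h <;> simp [h]
  have hgB : (op != "MatMult" && op != "BatchMatMult") = false := by
    rcases hop with h | h <;> simp [h]
  rw [hgA, hgB]
  simp only [if_true, Bool.false_eq_true, if_false]
  rw [glWrap_eq_glSeg, glFoldl_eq_glSeg]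
  simp [List.map, String.append_assoc]
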